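-- pv_equiv track=rewrite | github.com/CenterforDigitalHealth/ASCVD-Economic-Burden | imputation.py | normalize_file_tag
-- ===== SOURCE A (Python) =====
-- def normalize_file_tag(file_tag):
--     if file_tag is None:
--         return None
--     tag = str(file_tag).strip()
--     if tag == '':
--         return None
--     if tag.lower() == 'all':
--         return 'ALL'
--     safe = []
--     for ch in tag:
--         if ch.isalnum() or ch in ['_', '-']:
--             safe.append(ch.upper())
--         elif ch in [',', ' ', '/']:
--             safe.append('_')
--     safe_tag = ''.join(safe).strip('_')
--     while '__' in safe_tag:
--         safe_tag = safe_tag.replace('__', '_')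
--     return safe_tag if safe_tag != '' else None
-- ===== SOURCE B (Python) =====
-- def normalize_file_tag(file_tag):
--     if file_tag is None:
--         return None
--     tag = str(file_tag).strip()
--     if tag == '':
--         return None
--     if tag.lower() == 'all':
--         return 'ALL'
--     tokens = []
--     cur = ''
--     for ch in tag:
--         if ch.isalnum() or ch == '-':
--             cur += ch.upper()
--         elif ch in '_, /':
--             if cur:
--                 tokens.append(cur)
--             cur = ''
--     if cur:
--         tokens.append(cur)
--     return '_'.join(tokens) if tokens else None
-- ===== Notes on version B (the rewrite author's own statement) =====
-- stated objective: simpler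
-- what changed: Replaces A's three phases (map each char to a safe char, strip edge underscores, repeatedly collapse runs of double underscores) by a single tokenize pass that keeps a current-token buffer, flushes it at separator characters, and joins the tokens with single underscores.
import Mathlib
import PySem

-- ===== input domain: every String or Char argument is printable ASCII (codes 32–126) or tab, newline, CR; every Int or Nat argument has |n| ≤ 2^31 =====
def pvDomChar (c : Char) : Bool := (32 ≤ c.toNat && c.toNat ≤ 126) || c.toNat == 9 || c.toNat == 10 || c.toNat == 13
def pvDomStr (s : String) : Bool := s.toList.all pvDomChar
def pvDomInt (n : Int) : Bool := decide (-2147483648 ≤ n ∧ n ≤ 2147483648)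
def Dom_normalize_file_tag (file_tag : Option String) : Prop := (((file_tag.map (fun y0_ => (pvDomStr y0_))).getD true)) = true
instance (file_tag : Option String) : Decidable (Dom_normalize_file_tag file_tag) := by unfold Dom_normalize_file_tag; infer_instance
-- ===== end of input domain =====

-- B replaces A's map / strip-edge-underscores / collapse-double-underscores phases by one tokenize-and-join pass (objective: simpler).

-- ===== PORT A =====
-- the loop body of A's 'for ch in tag' (named so proofs can refer to it; same branches, same order)
def aStep (acc : List Char) (ch : Char) : List Char :=
  if PySem.Chars.isalnum ch || ch ∈ ['_', '-'] then acc ++ [PySem.Chars.upperChar ch]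
  else if ch ∈ [',', ' ', '/'] then acc ++ ['_'] else acc

-- A's "while '__' in safe_tag: safe_tag = safe_tag.replace('__','_')", ported with fuel;
-- fuel = length + 1 suffices: each iteration taken strictly shortens the string (proved below).
def collapseLoopA (fuel : Nat) (s : List Char) : List Char :=
  match fuel with
  | 0 => s
  | n + 1 =>
    if PySem.Chars.isIn ['_', '_'] s then collapseLoopA n (PySem.Chars.replace s ['_', '_'] ['_'])
    else s

def normalize_file_tag (file_tag : Option String) : Option String :=
  match file_tag with
  | none => none
  | some ft =>
    let tag := PySem.Chars.strip ft.toList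
    if tag = [] then none
    else if PySem.Chars.lower tag = ['a', 'l', 'l'] then some "ALL"
    else
      let safe := tag.foldl aStep []          -- ''.join(safe) of single chars = the list itself
      let safe_tag := PySem.Chars.stripChars safe ['_']
      let safe_tag := collapseLoopA (safe_tag.length + 1) safe_tag
      if safe_tag ≠ [] then some (String.ofList safe_tag) else none

-- ===== PORT B =====
-- the loop body of B's 'for ch in tag' over state (cur, tokens)
def bStep (st : List Char × List (List Char)) (ch : Char) : List Char × List (List Char) :=
  if PySem.Chars.isalnum ch || ch == '-' then (st.1 ++ [PySem.Chars.upperChar ch], st.2)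
  else if ch ∈ ['_', ',', ' ', '/'] then ([], if st.1 = [] then st.2 else st.2 ++ [st.1])
  else st

def normalize_file_tag_alt (file_tag : Option String) : Option String :=
  match file_tag with
  | none => none
  | some ft =>
    let tag := PySem.Chars.strip ft.toList
    if tag = [] then none
    else if PySem.Chars.lower tag = ['a', 'l', 'l'] then some "ALL"
    else
      let st := tag.foldl bStep ([], [])
      let tokens := if st.1 = [] then st.2 else st.2 ++ [st.1]
      if tokens = [] then none else some (String.ofList (PySem.Chars.join ['_'] tokens))

-- ===== PRECONDITION & SPEC =====
def Spec_normalize_file_tag (file_tag : Option String) (out : Option String) : Prop := out = normalize_file_tag_alt file_tag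
instance (file_tag : Option String) (out : Option String) : Decidable (Spec_normalize_file_tag file_tag out) := by unfold Spec_normalize_file_tag; infer_instance

-- ===== CLAIM (what is proved, stated in full; the proofs are below) =====
def Claim_equal_normalize_file_tag : Prop := ∀ (file_tag : Option String), Dom_normalize_file_tag file_tag → Spec_normalize_file_tag file_tag (normalize_file_tag file_tag)

-- ===== LEMMAS AND PROOFS =====

-- the per-character effect both loops share: kept char (uppercased), separator '_', or dropped
def ech (ch : Char) : Option Char :=
  if PySem.Chars.isalnum ch || ch ∈ ['_', '-'] then some (PySem.Chars.upperChar ch)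
  else if ch ∈ [',', ' ', '/'] then some '_' else none

-- tokens of a mapped string: '_' separates, runs of other chars are collected onto cur
def toks : List Char → List Char → List (List Char)
  | cur, [] => if cur = [] then [] else [cur]
  | cur, c :: r => if c = '_' then (if cur = [] then toks [] r else cur :: toks [] r) else toks (cur ++ [c]) r

-- one pass of s.replace('__','_')
def repDD : List Char → List Char
  | [] => []
  | [c] => [c]
  | a :: b :: t => if a = '_' ∧ b = '_' then '_' :: repDD t else a :: repDD (b :: t)

-- '__' occurs somewhere in s
def hasDD : List Char → Bool
  | a :: b :: t => (a = '_' && b = '_') || hasDD (b :: t)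
  | _ => false

theorem toks_nil (cur : List Char) : toks cur [] = if cur = [] then [] else [cur] := rfl

theorem toks_us (cur : List Char) (r : List Char) :
    toks cur ('_' :: r) = if cur = [] then toks [] r else cur :: toks [] r := by
  simp [toks]

theorem toks_ch (cur : List Char) (c : Char) (r : List Char) (h : c ≠ '_') :
    toks cur (c :: r) = toks (cur ++ [c]) r := by
  simp [toks, h]

theorem upperChar_ne_underscore (ch : Char) (h : (PySem.Chars.isalnum ch || ch == '-') = true) :
    PySem.Chars.upperChar ch ≠ '_' := by
  unfold PySem.Chars.upperChar
  split
  · rename_i hl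
    have hr : 97 ≤ ch.toNat ∧ ch.toNat ≤ 122 := by
      simp [PySem.Chars.islower, Char.le_def] at hl
      exact ⟨hl.1, hl.2⟩
    intro he
    have h2 : (Char.ofNat (ch.toNat - 32)).toNat = 95 := by rw [he]; decide
    rw [Char.toNat_ofNat] at h2
    rw [if_pos] at h2
    · omega
    · unfold Nat.isValidChar; left; omega
  · intro he; subst he
    simp [PySem.Chars.isalnum, PySem.Chars.isalpha, PySem.Chars.isdigit, PySem.Chars.isupper,
      PySem.Chars.islower] at h

theorem aStep_eq (acc : List Char) (ch : Char) : aStep acc ch = acc ++ (ech ch).toList := by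
  unfold aStep ech
  split
  · simp
  · split <;> simp

theorem foldA_eq (l : List Char) : ∀ (acc : List Char),
    l.foldl aStep acc = acc ++ l.filterMap ech := by
  induction l with
  | nil => simp
  | cons c r ih =>
    intro acc
    rw [List.foldl_cons, aStep_eq, ih, List.filterMap_cons]
    cases h : ech c <;> simp [h]

theorem foldB_eq (l : List Char) : ∀ (cur : List Char) (tk : List (List Char)),
    (if (l.foldl bStep (cur, tk)).1 = [] then (l.foldl bStep (cur, tk)).2
     else (l.foldl bStep (cur, tk)).2 ++ [(l.foldl bStep (cur, tk)).1])
    = tk ++ toks cur (l.filterMap ech) := by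
  induction l with
  | nil =>
    intro cur tk
    simp only [List.foldl_nil, List.filterMap_nil, toks_nil]
    by_cases h : cur = [] <;> simp [h]
  | cons ch r ih =>
    intro cur tk
    rw [List.foldl_cons]
    by_cases hb1 : (PySem.Chars.isalnum ch || ch == '-') = true
    · have hech : ech ch = some (PySem.Chars.upperChar ch) := by
        rcases Bool.or_eq_true _ _ |>.mp hb1 with h | h
        · unfold ech; rw [if_pos (by rw [h]; rfl)]
        · have : ch = '-' := by simpa using h
          subst this; decide
      rw [show bStep (cur, tk) ch = (cur ++ [PySem.Chars.upperChar ch], tk) from by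
        unfold bStep; rw [if_pos hb1]]
      rw [List.filterMap_cons_some (f := ech) hech, ih,
        toks_ch _ _ _ (upperChar_ne_underscore ch hb1)]
    · by_cases hb2 : ch ∈ ['_', ',', ' ', '/']
      · have hech : ech ch = some '_' := by fin_cases hb2 <;> decide
        rw [show bStep (cur, tk) ch = ([], if cur = [] then tk else tk ++ [cur]) from by
          unfold bStep; rw [if_neg (by simp_all), if_pos hb2]]
        rw [List.filterMap_cons_some (f := ech) hech, toks_us]
        by_cases hc : cur = []
        · rw [if_pos hc, if_pos hc, ih]
        · rw [if_neg hc, if_neg hc, ih]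
          simp
      · have hch : ch ≠ '_' ∧ ch ≠ ',' ∧ ch ≠ ' ' ∧ ch ≠ '/' := by
          simp only [List.mem_cons, List.mem_singleton] at hb2
          push_neg at hb2
          exact ⟨hb2.1, hb2.2.1, hb2.2.2.1, by simpa using hb2.2.2.2⟩
        have hna : PySem.Chars.isalnum ch = false ∧ ch ≠ '-' := by
          simp only [Bool.or_eq_true, beq_iff_eq] at hb1
          push_neg at hb1
          exact ⟨eq_false_of_ne_true hb1.1, hb1.2⟩
        have hech : ech ch = none := by
          unfold ech
          rw [if_neg, if_neg]
          · simp only [List.mem_cons, List.mem_singleton]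
            push_neg
            exact ⟨hch.2.1, hch.2.2.1, hch.2.2.2, by simp⟩
          · simp only [Bool.or_eq_true, decide_eq_true_eq, List.mem_cons, List.mem_singleton]
            push_neg
            exact ⟨by simpa using hna.1, hch.1, hna.2, by simp⟩
        rw [show bStep (cur, tk) ch = (cur, tk) from by
          unfold bStep; rw [if_neg (by simp_all), if_neg hb2]]
        rw [List.filterMap_cons_none (f := ech) hech, ih]

theorem replace_go_eq (fuel : Nat) : ∀ (l acc : List Char), l.length ≤ fuel →
    PySem.Chars.replace.go ['_','_'] ['_'] fuel l acc = acc.reverse ++ repDD l := by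
  induction fuel with
  | zero =>
    intro l acc h
    have : l = [] := by cases l <;> simp_all
    subst this; simp [PySem.Chars.replace.go, repDD]
  | succ n ih =>
    intro l acc h
    match l with
    | [] => simp [PySem.Chars.replace.go, repDD]
    | [c] =>
      simp only [PySem.Chars.replace.go, repDD]
      rw [if_neg (by simp [List.isPrefixOf])]
      rw [ih [] _ (by simp)]
      simp [repDD]
    | a :: b :: t =>
      by_cases hd : a = '_' ∧ b = '_'
      · obtain ⟨ha, hb⟩ := hd; subst ha; subst hb
        simp only [PySem.Chars.replace.go]
        rw [if_pos (by simp [List.isPrefixOf])]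
        simp only [List.length_cons] at h
        rw [show List.drop (['_','_'] : List Char).length ('_'::'_'::t) = t by simp]
        rw [ih t _ (by omega)]
        simp [repDD]
      · simp only [PySem.Chars.replace.go]
        rw [if_neg (by simp [List.isPrefixOf]; intro h1 h2; exact hd ⟨h1.symm, h2.symm⟩)]
        simp only [List.length_cons] at h
        rw [ih (b :: t) _ (by simp; omega)]
        simp only [repDD, if_neg hd]
        simp

theorem replace_eq_repDD (s : List Char) :
    PySem.Chars.replace s ['_', '_'] ['_'] = repDD s := by
  unfold PySem.Chars.replace
  rw [if_neg (by decide)]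
  exact replace_go_eq s.length s [] (le_refl _)

theorem hasDD_iff (s : List Char) : hasDD s = true ↔ ['_','_'] <:+: s := by
  induction s with
  | nil => simp [hasDD]
  | cons a r ih =>
    match r with
    | [] => simp [hasDD]; intro h; have := h.length_le; simp at this
    | b :: t =>
      rw [List.infix_cons_iff]
      constructor
      · intro h
        simp only [hasDD, Bool.or_eq_true, Bool.and_eq_true, decide_eq_true_eq] at h
        rcases h with ⟨h1, h2⟩ | h
        · subst h1; subst h2; left; simp [List.cons_prefix_cons]
        · right; exact ih.mp h
      · intro h
        rcases h with h | h
        · rw [List.cons_prefix_cons] at h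
          obtain ⟨h1, h2⟩ := h
          rw [List.cons_prefix_cons] at h2
          simp [hasDD, h1.symm, h2.1.symm]
        · simp only [hasDD, Bool.or_eq_true]
          right; exact ih.mpr h

theorem isIn_eq_hasDD (s : List Char) : PySem.Chars.isIn ['_', '_'] s = hasDD s := by
  by_cases h : hasDD s = true
  · rw [h, PySem.Chars.isIn_iff_infix]; exact (hasDD_iff s).mp h
  · have h' := eq_false_of_ne_true h
    rw [h', PySem.Chars.isIn_eq_false_iff]
    intro hc; exact h ((hasDD_iff s).mpr hc)

theorem repDD_length_le (s : List Char) : (repDD s).length ≤ s.length := by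
  induction s using repDD.induct with
  | case1 => simp [repDD]
  | case2 c => simp [repDD]
  | case3 a b t hd ih => simp only [repDD, if_pos hd, List.length_cons]; omega
  | case4 a b t hd ih =>
    simp only [repDD, if_neg hd, List.length_cons]
    simp only [List.length_cons] at ih
    omega

theorem repDD_length (s : List Char) (h : hasDD s = true) : (repDD s).length < s.length := by
  induction s using repDD.induct with
  | case1 => simp [hasDD] at h
  | case2 c => simp [hasDD] at h
  | case3 a b t hd ih =>
    have hlen := repDD_length_le t
    simp only [repDD, if_pos hd, List.length_cons]
    omega
  | case4 a b t hd ih =>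
    simp only [hasDD, Bool.or_eq_true, Bool.and_eq_true, decide_eq_true_eq] at h
    rcases h with ⟨h1, h2⟩ | h
    · exact absurd ⟨h1, h2⟩ hd
    · have := ih (by simp [hasDD, h])
      simp only [repDD, if_neg hd, List.length_cons]
      simp only [List.length_cons] at this ⊢
      omega

theorem toks_repDD (s : List Char) : ∀ cur, toks cur (repDD s) = toks cur s := by
  induction s using repDD.induct with
  | case1 => intro cur; simp [repDD]
  | case2 c => intro cur; simp [repDD]
  | case3 a b t hd ih =>
    intro cur
    obtain ⟨ha, hb⟩ := hd; subst ha; subst hb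
    rw [show repDD ('_' :: '_' :: t) = '_' :: repDD t from by rw [repDD, if_pos ⟨rfl, rfl⟩]]
    rw [toks_us, toks_us, ih [], show toks [] ('_' :: t) = toks [] t from by rw [toks_us, if_pos rfl]]
  | case4 a b t hd ih =>
    intro cur
    rw [show repDD (a :: b :: t) = a :: repDD (b :: t) from by rw [repDD, if_neg hd]]
    by_cases ha : a = '_'
    · subst ha
      rw [toks_us, toks_us, ih []]
    · rw [toks_ch _ _ _ ha, toks_ch _ _ _ ha, ih (cur ++ [a])]

theorem repDD_head? (s : List Char) : (repDD s).head? = s.head? := by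
  induction s using repDD.induct with
  | case1 => rfl
  | case2 c => rfl
  | case3 a b t hd ih =>
    obtain ⟨ha, hb⟩ := hd; subst ha; subst hb
    rw [show repDD ('_' :: '_' :: t) = '_' :: repDD t from by rw [repDD, if_pos ⟨rfl, rfl⟩]]
    simp
  | case4 a b t hd ih =>
    rw [show repDD (a :: b :: t) = a :: repDD (b :: t) from by rw [repDD, if_neg hd]]
    simp

theorem repDD_ne_nil (s : List Char) (h : s ≠ []) : repDD s ≠ [] := by
  intro hc
  have h2 := repDD_head? s
  rw [hc] at h2
  cases s with
  | nil => exact h rfl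
  | cons a t => simp at h2

theorem getLast?_cons_of_ne_nil {α : Type} (a : α) (l : List α) (h : l ≠ []) :
    (a :: l).getLast? = l.getLast? := by
  rw [show a :: l = [a] ++ l from rfl, List.getLast?_append]
  cases hl : l.getLast? with
  | none => exact absurd (List.getLast?_eq_none_iff.mp hl) h
  | some x => rfl

theorem repDD_getLast? (s : List Char) : ∀ (h : s.getLast? ≠ some '_'),
    (repDD s).getLast? = s.getLast? := by
  induction s using repDD.induct with
  | case1 => intro h; rfl
  | case2 c => intro h; rfl
  | case3 a b t hd ih =>
    intro h
    obtain ⟨ha, hb⟩ := hd; subst ha; subst hb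
    cases ht : t with
    | nil => exfalso; apply h; subst ht; decide
    | cons x xs =>
      rw [← ht]
      have htne : t ≠ [] := by rw [ht]; simp
      have hlast : ('_' :: '_' :: t).getLast? = t.getLast? := by
        rw [getLast?_cons_of_ne_nil _ _ (by simp), getLast?_cons_of_ne_nil _ _ htne]
      have ht' : t.getLast? ≠ some '_' := by rw [← hlast]; exact h
      rw [show repDD ('_' :: '_' :: t) = '_' :: repDD t from by rw [repDD, if_pos ⟨rfl, rfl⟩]]
      rw [getLast?_cons_of_ne_nil _ _ (repDD_ne_nil t htne), ih ht', hlast]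
  | case4 a b t hd ih =>
    intro h
    have hlast : (a :: b :: t).getLast? = (b :: t).getLast? := getLast?_cons_of_ne_nil _ _ (by simp)
    have ht' : (b :: t).getLast? ≠ some '_' := by rw [← hlast]; exact h
    rw [show repDD (a :: b :: t) = a :: repDD (b :: t) from by rw [repDD, if_neg hd]]
    rw [getLast?_cons_of_ne_nil _ _ (repDD_ne_nil _ (by simp)), ih ht', hlast]

theorem loop_spec (fuel : Nat) : ∀ (s : List Char), s.length ≤ fuel → s.getLast? ≠ some '_' →
    hasDD (collapseLoopA fuel s) = false
    ∧ toks [] (collapseLoopA fuel s) = toks [] s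
    ∧ (collapseLoopA fuel s).head? = s.head?
    ∧ (collapseLoopA fuel s).getLast? = s.getLast? := by
  induction fuel with
  | zero =>
    intro s h hl
    have : s = [] := by cases s <;> simp_all
    subst this
    exact ⟨rfl, rfl, rfl, rfl⟩
  | succ n ih =>
    intro s h hl
    rw [show collapseLoopA (n+1) s = if PySem.Chars.isIn ['_','_'] s then
        collapseLoopA n (PySem.Chars.replace s ['_','_'] ['_']) else s from rfl]
    by_cases hin : PySem.Chars.isIn ['_','_'] s = true
    · rw [if_pos hin, replace_eq_repDD]
      have hdd : hasDD s = true := by rw [← isIn_eq_hasDD]; exact hin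
      have hlen : (repDD s).length < s.length := repDD_length s hdd
      have hlast' : (repDD s).getLast? = s.getLast? := repDD_getLast? s hl
      obtain ⟨c1, c2, c3, c4⟩ := ih (repDD s) (by omega) (by rw [hlast']; exact hl)
      exact ⟨c1, by rw [c2, toks_repDD], by rw [c3, repDD_head?], by rw [c4, hlast']⟩
    · rw [if_neg hin]
      refine ⟨?_, rfl, rfl, rfl⟩
      rw [← isIn_eq_hasDD]
      exact eq_false_of_ne_true hin

theorem hasDD_tail (a : Char) (r : List Char) (h : hasDD (a :: r) = false) : hasDD r = false := by
  cases r with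
  | nil => rfl
  | cons b t => simp only [hasDD, Bool.or_eq_false_iff] at h; exact h.2

theorem join_toks (s : List Char) : ∀ cur, hasDD s = false → s.getLast? ≠ some '_' →
    (s.head? = some '_' → cur ≠ []) →
    PySem.Chars.join ['_'] (toks cur s) = cur ++ s := by
  induction s with
  | nil =>
    intro cur _ _ _
    rw [toks_nil]
    split
    · subst ‹cur = []›; simp [PySem.Chars.join_nil]
    · simp [PySem.Chars.join_singleton]
  | cons c r ih =>
    intro cur hdd hlast hhd
    by_cases hc : c = '_'
    · subst hc
      have hcur : cur ≠ [] := hhd (by rfl)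
      have hrne : r ≠ [] := by
        intro h; subst h; exact hlast (by decide)
      have hrhd : r.head? ≠ some '_' := by
        cases r with
        | nil => simp
        | cons x xs =>
          intro hx
          simp only [List.head?_cons, Option.some.injEq] at hx
          subst hx
          simp [hasDD] at hdd
      have hrdd : hasDD r = false := hasDD_tail _ _ hdd
      have hrlast : r.getLast? ≠ some '_' := by
        rw [← getLast?_cons_of_ne_nil '_' r hrne]; exact hlast
      have hr := ih [] hrdd hrlast (by intro hx; exact absurd hx hrhd)
      rw [toks_us, if_neg hcur]
      have htne : toks [] r ≠ [] := by
        intro hx; rw [hx] at hr; rw [PySem.Chars.join_nil] at hr; exact hrne hr.symm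
      cases htk : toks [] r with
      | nil => exact absurd htk htne
      | cons q rest =>
        rw [PySem.Chars.join_cons_cons]
        rw [← htk, hr]
        simp
    · rw [toks_ch _ _ _ hc]
      cases hr : r with
      | nil =>
        rw [toks_nil, if_neg (by simp)]
        rw [PySem.Chars.join_singleton]
      | cons x xs =>
        rw [← hr]
        have hrne : r ≠ [] := by rw [hr]; simp
        have := ih (cur ++ [c]) (hasDD_tail _ _ hdd)
          (by rw [← getLast?_cons_of_ne_nil c r hrne]; exact hlast)
          (by intro _; simp)
        rw [this]
        simp

theorem toks_all_us (t : List Char) : ∀ cur, (∀ c ∈ t, c = '_') →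
    toks cur t = if cur = [] then [] else [cur] := by
  induction t with
  | nil => intro cur _; rfl
  | cons c r ih =>
    intro cur hall
    have hc : c = '_' := hall c (by simp)
    subst hc
    rw [toks_us]
    have hr := ih [] (fun x hx => hall x (by simp [hx]))
    rw [if_pos rfl] at hr
    split
    · rw [hr]
    · rw [hr]

theorem toks_append_us (s : List Char) : ∀ (t : List Char) cur, (∀ c ∈ t, c = '_') →
    toks cur (s ++ t) = toks cur s := by
  induction s with
  | nil =>
    intro t cur hall
    simp only [List.nil_append]
    rw [toks_all_us t cur hall, toks_nil]
  | cons c r ih =>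
    intro t cur hall
    by_cases hc : c = '_'
    · subst hc
      simp only [List.cons_append]
      rw [toks_us, toks_us, ih t [] hall]
    · simp only [List.cons_append]
      rw [toks_ch _ _ _ hc, toks_ch _ _ _ hc, ih t _ hall]

theorem toks_ldrop (s : List Char) (p : Char → Bool) (hp : ∀ c, p c = true → c = '_') :
    toks [] (List.dropWhile p s) = toks [] s := by
  induction s with
  | nil => rfl
  | cons c r ih =>
    by_cases hc : p c
    · rw [List.dropWhile_cons_of_pos hc, ih, hp c hc, toks_us, if_pos rfl]
    · rw [List.dropWhile_cons_of_neg hc]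

theorem dropWhile_head?_neg {α : Type} (p : α → Bool) (l : List α) (c : α)
    (h : (List.dropWhile p l).head? = some c) : p c = false := by
  induction l with
  | nil => simp [List.dropWhile] at h
  | cons a r ih =>
    by_cases ha : p a
    · rw [List.dropWhile_cons_of_pos ha] at h; exact ih h
    · rw [List.dropWhile_cons_of_neg ha] at h
      simp only [List.head?_cons, Option.some.injEq] at h
      subst h; exact eq_false_of_ne_true ha

theorem stripU_decomp (s : List Char) :
    PySem.Chars.stripChars s ['_'] =
      (List.dropWhile (fun c => (['_'] : List Char).contains c)
        ((List.dropWhile (fun c => (['_'] : List Char).contains c) s).reverse)).reverse := by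
  rfl

theorem toks_strip (s : List Char) :
    toks [] (PySem.Chars.stripChars s ['_']) = toks [] s := by
  rw [stripU_decomp]
  set p : Char → Bool := fun c => (['_'] : List Char).contains c with hp
  have hpc : ∀ c, p c = true → c = '_' := by intro c h; simpa [hp] using h
  set A1 := List.dropWhile p s with hA1
  have hsplit : A1 = (List.dropWhile p A1.reverse).reverse ++ (List.takeWhile p A1.reverse).reverse := by
    rw [← List.reverse_append, List.takeWhile_append_dropWhile, List.reverse_reverse]
  have htail : ∀ c ∈ (List.takeWhile p A1.reverse).reverse, c = '_' := by
    intro c hc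
    rw [List.mem_reverse] at hc
    exact hpc c (List.mem_takeWhile_imp hc)
  calc toks [] (List.dropWhile p A1.reverse).reverse
      = toks [] ((List.dropWhile p A1.reverse).reverse ++ (List.takeWhile p A1.reverse).reverse) := by
        rw [toks_append_us _ _ _ htail]
    _ = toks [] A1 := by rw [← hsplit]
    _ = toks [] s := toks_ldrop s p hpc

theorem strip_head? (s : List Char) : (PySem.Chars.stripChars s ['_']).head? ≠ some '_' := by
  rw [stripU_decomp]
  set p : Char → Bool := fun c => (['_'] : List Char).contains c with hp
  set A1 := List.dropWhile p s with hA1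
  intro h
  rw [← List.getLast?_eq_head?_reverse] at h
  set X := List.dropWhile p A1.reverse with hX
  have hXne : X ≠ [] := by
    intro hx; rw [hx] at h; simp at h
  obtain ⟨w, hw⟩ := List.dropWhile_suffix (l := A1.reverse) p
  have hlast : X.getLast? = A1.reverse.getLast? := by
    rw [← hw, List.getLast?_append]
    cases hl : X.getLast? with
    | none => exact absurd (List.getLast?_eq_none_iff.mp hl) hXne
    | some x => rfl
  rw [hlast, List.getLast?_eq_head?_reverse, List.reverse_reverse] at h
  have := dropWhile_head?_neg p s '_' h
  simp [hp] at this

theorem strip_getLast? (s : List Char) : (PySem.Chars.stripChars s ['_']).getLast? ≠ some '_' := by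
  rw [stripU_decomp]
  intro h
  rw [List.getLast?_eq_head?_reverse, List.reverse_reverse] at h
  have := dropWhile_head?_neg _ _ '_' h
  simp at this

theorem toks_no_nil (s : List Char) : ∀ cur, [] ∉ toks cur s := by
  induction s with
  | nil =>
    intro cur
    rw [toks_nil]
    split
    · simp
    · simp only [List.mem_singleton]
      intro hc
      exact absurd hc.symm ‹¬ cur = []›
  | cons c r ih =>
    intro cur
    by_cases hc : c = '_'
    · subst hc
      rw [toks_us]
      split
      · exact ih []
      · intro hm
        rcases List.mem_cons.mp hm with h | h
        · exact absurd h.symm ‹¬ cur = []›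
        · exact ih [] h
    · rw [toks_ch _ _ _ hc]
      exact ih (cur ++ [c])

theorem join_ne_nil (q : List Char) (rest : List (List Char)) (hq : q ≠ []) :
    PySem.Chars.join ['_'] (q :: rest) ≠ [] := by
  cases rest with
  | nil => rw [PySem.Chars.join_singleton]; exact hq
  | cons p ps =>
    rw [PySem.Chars.join_cons_cons]
    simp [hq]

-- the two pipelines agree on the already-stripped, non-guard tag
theorem tails_eq (tag : List Char) :
    (if collapseLoopA ((PySem.Chars.stripChars (tag.foldl aStep []) ['_']).length + 1)
          (PySem.Chars.stripChars (tag.foldl aStep []) ['_']) ≠ [] then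
       some (String.ofList (collapseLoopA ((PySem.Chars.stripChars (tag.foldl aStep []) ['_']).length + 1)
          (PySem.Chars.stripChars (tag.foldl aStep []) ['_'])))
     else none)
    = (if (if (tag.foldl bStep ([], [])).1 = [] then (tag.foldl bStep ([], [])).2
          else (tag.foldl bStep ([], [])).2 ++ [(tag.foldl bStep ([], [])).1]) = [] then none
       else some (String.ofList (PySem.Chars.join ['_']
          (if (tag.foldl bStep ([], [])).1 = [] then (tag.foldl bStep ([], [])).2
           else (tag.foldl bStep ([], [])).2 ++ [(tag.foldl bStep ([], [])).1])))) := by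
  have hm : tag.foldl aStep [] = tag.filterMap ech := by rw [foldA_eq]; rfl
  rw [hm, foldB_eq, List.nil_append]
  set m := tag.filterMap ech with hmdef
  set s0 := PySem.Chars.stripChars m ['_'] with hs0
  set t := collapseLoopA (s0.length + 1) s0 with ht
  obtain ⟨c1, c2, c3, c4⟩ := loop_spec (s0.length + 1) s0 (by omega) (strip_getLast? m)
  have hthd : t.head? ≠ some '_' := by rw [ht, c3]; exact strip_head? m
  have htlast : t.getLast? ≠ some '_' := by rw [ht, c4]; exact strip_getLast? m
  have htoks : toks [] t = toks [] m := by rw [ht, c2, hs0, toks_strip]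
  have hjoin : PySem.Chars.join ['_'] (toks [] m) = t := by
    rw [← htoks]
    have hj := join_toks t [] c1 htlast (fun hx => absurd hx hthd)
    rw [hj]; rfl
  by_cases hz : toks [] m = []
  · rw [hz] at hjoin
    rw [PySem.Chars.join_nil] at hjoin
    rw [if_neg (by rw [← hjoin]; simp), if_pos hz]
  · cases hq : toks [] m with
    | nil => exact absurd hq hz
    | cons q rest =>
      have hqne : q ≠ [] := by
        intro hx; subst hx
        exact toks_no_nil m [] (by rw [hq]; simp)
      rw [hq] at hjoin
      have hne : t ≠ [] := by rw [← hjoin]; exact join_ne_nil q rest hqne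
      rw [if_pos hne, if_neg (by simp), ← hjoin]

-- ===== VERDICT (by name: the statement is the Claim_ definition above) =====
theorem normalize_file_tag_spec : Claim_equal_normalize_file_tag := by
  intro file_tag _
  unfold Spec_normalize_file_tag
  cases file_tag with
  | none => rfl
  | some s =>
    show normalize_file_tag (some s) = normalize_file_tag_alt (some s)
    unfold normalize_file_tag normalize_file_tag_alt
    simp only []
    by_cases h1 : PySem.Chars.strip s.toList = []
    · simp [h1]
    · by_cases h2 : PySem.Chars.lower (PySem.Chars.strip s.toList) = ['a', 'l', 'l']
      · simp [h1, h2]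
      · simp only [if_neg h1, if_neg h2]
        exact tails_eq (PySem.Chars.strip s.toList)
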